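-- pv_equiv track=rewrite | github.com/johnellis1392/programming_problems | python_algorithms/max_profits.py | max_profits
-- ===== SOURCE A (Python) =====
-- def max_profits(array):
--     """
--     Max stock profits function.
--     """
--
--     result = []
--     i = 0
--     while i < len(array):
--         j = i + 1
--         while j < len(array) and array[j] - array[j - 1] >= 0:
--             j += 1
--
--         if array[j - 1] - array[i] >= 0:
--             result.append((i, j - 1))
--             i = j
--         else:
--             i += 1
--
--     return result
-- ===== SOURCE B (Python) =====
-- def max_profits(array):
--     # Two-pass: collect run boundaries, then pair consecutive boundaries into ranges.
--     n = len(array)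
--     if n == 0:
--         return []
--     boundaries = [0]
--     for j in range(1, n):
--         if not (array[j] - array[j - 1] >= 0):
--             boundaries.append(j)
--     boundaries.append(n)
--     return [(boundaries[k], boundaries[k + 1] - 1) for k in range(len(boundaries) - 1)]
-- ===== Notes on version B (the rewrite author's own statement) =====
-- stated objective: alternative
-- what changed: Replaces A's nested while-loops with an index jump by a flat two-pass scheme: one pass collecting run-boundary indices into a table, then a pass pairing consecutive boundaries into the result ranges.
import Mathlib
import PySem

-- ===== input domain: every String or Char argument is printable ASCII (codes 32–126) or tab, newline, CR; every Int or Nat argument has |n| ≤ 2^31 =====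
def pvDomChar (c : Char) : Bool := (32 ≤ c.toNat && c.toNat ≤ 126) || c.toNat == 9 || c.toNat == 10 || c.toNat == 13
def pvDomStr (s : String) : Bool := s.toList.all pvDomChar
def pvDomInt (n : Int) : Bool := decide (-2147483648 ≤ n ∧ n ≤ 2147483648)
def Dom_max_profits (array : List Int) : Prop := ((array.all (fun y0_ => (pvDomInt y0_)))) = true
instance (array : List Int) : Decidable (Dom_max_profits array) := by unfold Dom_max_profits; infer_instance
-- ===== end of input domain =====

-- B replaces A's nested while-loops by a boundary table plus a pairing pass; same O(n) cost, return value proved equal.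

-- ===== PORT A =====
-- inner while loop: while j < len(array) and array[j] - array[j-1] >= 0: j += 1
-- (all indices reached are in range, so List.getD is exact for Python's array[j])
def maxProfitsInner (array : List Int) (j : Nat) : Nat :=
  if _h : j < array.length ∧ array.getD j 0 - array.getD (j - 1) 0 ≥ 0 then
    maxProfitsInner array (j + 1)
  else j
termination_by array.length - j
decreasing_by omega

-- the port's outer loop needs this for termination (the inner loop never moves j backwards)
theorem maxProfitsInner_ge (array : List Int) (j : Nat) : j ≤ maxProfitsInner array j := by
  induction j using maxProfitsInner.induct (array := array) with
  | case1 j h ih => rw [maxProfitsInner, dif_pos h]; omega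
  | case2 j h => rw [maxProfitsInner, dif_neg h]

-- outer while loop with its accumulator `result`
def maxProfitsLoop (array : List Int) (i : Nat) (result : List (Int × Int)) : List (Int × Int) :=
  if _h : i < array.length then
    let j := maxProfitsInner array (i + 1)
    if array.getD (j - 1) 0 - array.getD i 0 ≥ 0 then
      maxProfitsLoop array j (result ++ [((i : Int), (j : Int) - 1)])
    else
      maxProfitsLoop array (i + 1) result
  else result
termination_by array.length - i
decreasing_by
  · have := maxProfitsInner_ge array (i + 1); omega
  · omega

def max_profits (array : List Int) : List (Int × Int) := maxProfitsLoop array 0 []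

-- ===== PORT B =====
-- boundaries = [0] + [j in range(1,n) if not (array[j]-array[j-1] >= 0)] + [n];
-- the comprehension pairing consecutive boundaries is ported as zip-with-tail.
def max_profits_alt (array : List Int) : List (Int × Int) :=
  let n := array.length
  if n = 0 then []
  else
    let boundaries :=
      (0 :: (List.range' 1 (n - 1)).filter
          (fun j => !decide (array.getD j 0 - array.getD (j - 1) 0 ≥ 0))) ++ [n]
    (boundaries.zip boundaries.tail).map (fun p => ((p.1 : Int), (p.2 : Int) - 1))

-- ===== PRECONDITION & SPEC =====
def Spec_max_profits (array : List Int) (out : List (Int × Int)) : Prop := out = max_profits_alt array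
instance (array : List Int) (out : List (Int × Int)) : Decidable (Spec_max_profits array out) := by unfold Spec_max_profits; infer_instance

-- ===== CLAIM (what is proved, stated in full; the proofs are below) =====
def Claim_equal_max_profits : Prop := ∀ (array : List Int), Dom_max_profits array → Spec_max_profits array (max_profits array)

-- ===== LEMMAS AND PROOFS =====

-- common reference: the list of maximal non-decreasing runs starting at index i
def pvRuns (array : List Int) (i : Nat) : List (Int × Int) :=
  if _h : i < array.length then
    ((i : Int), (maxProfitsInner array (i + 1) : Int) - 1) :: pvRuns array (maxProfitsInner array (i + 1))
  else []
termination_by array.length - i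
decreasing_by have := maxProfitsInner_ge array (i + 1); omega

theorem maxProfitsInner_le (array : List Int) (j : Nat) (h : j ≤ array.length) :
    maxProfitsInner array j ≤ array.length := by
  induction j using maxProfitsInner.induct (array := array) with
  | case1 j h1 ih => rw [maxProfitsInner, dif_pos h1]; exact ih (by omega)
  | case2 j h1 => rw [maxProfitsInner, dif_neg h1]; exact h

theorem maxProfitsInner_notP (array : List Int) (j k : Nat) (hj : j ≤ k)
    (hk : k < maxProfitsInner array j) :
    array.getD k 0 - array.getD (k - 1) 0 ≥ 0 := by
  induction j using maxProfitsInner.induct (array := array) with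
  | case1 j h1 ih =>
    rw [maxProfitsInner, dif_pos h1] at hk
    rcases Nat.eq_or_lt_of_le hj with rfl | hlt
    · exact h1.2
    · exact ih (by omega) hk
  | case2 j h1 =>
    rw [maxProfitsInner, dif_neg h1] at hk; omega

theorem maxProfitsInner_stop (array : List Int) (j : Nat)
    (h : maxProfitsInner array j < array.length) :
    ¬ (array.getD (maxProfitsInner array j) 0 - array.getD (maxProfitsInner array j - 1) 0 ≥ 0) := by
  induction j using maxProfitsInner.induct (array := array) with
  | case1 j h1 ih =>
    rw [maxProfitsInner, dif_pos h1] at h ⊢; exact ih h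
  | case2 j h1 =>
    rw [maxProfitsInner, dif_neg h1] at h ⊢
    intro hc; exact h1 ⟨h, hc⟩

theorem maxProfitsInner_chain (array : List Int) (j : Nat) :
    array.getD (maxProfitsInner array j - 1) 0 ≥ array.getD (j - 1) 0 := by
  induction j using maxProfitsInner.induct (array := array) with
  | case1 j h1 ih =>
    rw [maxProfitsInner, dif_pos h1]
    have h2 : array.getD ((j + 1) - 1) 0 = array.getD j 0 := by norm_num
    have := h1.2
    rw [h2] at ih; omega
  | case2 j h1 => rw [maxProfitsInner, dif_neg h1]

theorem maxProfitsLoop_eq_runs_aux (array : List Int) (fuel : Nat) : ∀ (i : Nat)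
    (res : List (Int × Int)), array.length ≤ i + fuel →
    maxProfitsLoop array i res = res ++ pvRuns array i := by
  induction fuel with
  | zero =>
    intro i res hle
    rw [maxProfitsLoop, dif_neg (by omega), pvRuns, dif_neg (by omega)]; simp
  | succ f ih =>
    intro i res hle
    by_cases h : i < array.length
    · have hji := maxProfitsInner_ge array (i + 1)
      have hcond : array.getD (maxProfitsInner array (i + 1) - 1) 0 - array.getD i 0 ≥ 0 := by
        have hc := maxProfitsInner_chain array (i + 1)
        simp only [Nat.add_sub_cancel] at hc
        omega
      rw [maxProfitsLoop]
      simp only [dif_pos h, if_pos hcond]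
      rw [pvRuns, dif_pos h, ih (maxProfitsInner array (i + 1)) _ (by omega)]
      simp
    · rw [maxProfitsLoop, dif_neg h, pvRuns, dif_neg h]; simp

-- A's loop builds exactly pvRuns behind the accumulator (the else branch is unreachable)
theorem maxProfitsLoop_eq_runs (array : List Int) (i : Nat) (res : List (Int × Int)) :
    maxProfitsLoop array i res = res ++ pvRuns array i :=
  maxProfitsLoop_eq_runs_aux array array.length i res (by omega)

-- B's pairing of consecutive boundaries, starting from head index i, is pvRuns i
theorem pairs_eq_runs (array : List Int) (i : Nat) (hi : i < array.length) :
    (((i :: (List.range' (i + 1) (array.length - (i + 1))).filter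
          (fun j => !decide (array.getD j 0 - array.getD (j - 1) 0 ≥ 0))) ++ [array.length]).zip
        (((i :: (List.range' (i + 1) (array.length - (i + 1))).filter
          (fun j => !decide (array.getD j 0 - array.getD (j - 1) 0 ≥ 0))) ++ [array.length]).tail)).map
      (fun p => ((p.1 : Int), (p.2 : Int) - 1))
    = pvRuns array i := by
  induction i using pvRuns.induct (array := array) with
  | case1 i h ih =>
    have hji : i + 1 ≤ maxProfitsInner array (i + 1) := maxProfitsInner_ge array (i + 1)
    have hjn : maxProfitsInner array (i + 1) ≤ array.length :=
      maxProfitsInner_le array (i + 1) (by omega)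
    generalize hj : maxProfitsInner array (i + 1) = j at *
    -- split range' (i+1) (n-(i+1)) at j
    have hsplit : List.range' (i + 1) (array.length - (i + 1)) =
        List.range' (i + 1) (j - (i + 1)) ++ List.range' j (array.length - j) := by
      have h1 := @List.range'_append (i + 1) (j - (i + 1)) (array.length - j) 1
      rw [show (i + 1) + 1 * (j - (i + 1)) = j by omega] at h1
      rw [show (j - (i + 1)) + (array.length - j) = array.length - (i + 1) by omega] at h1
      exact h1.symm
    have hfilt1 : (List.range' (i + 1) (j - (i + 1))).filter
        (fun k => !decide (array.getD k 0 - array.getD (k - 1) 0 ≥ 0)) = [] := by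
      apply List.filter_eq_nil_iff.mpr
      intro k hk
      have hkb := List.mem_range'.mp hk
      simp only [Bool.not_eq_true', decide_eq_false_iff_not, Decidable.not_not]
      exact maxProfitsInner_notP array (i + 1) k (by omega) (by omega)
    rw [pvRuns, dif_pos h, hj]
    rw [hsplit, List.filter_append, hfilt1, List.nil_append]
    rcases Nat.eq_or_lt_of_le hjn with heq | hjlt
    · -- j = n : second chunk empty, the boundary list is [i, n]
      rw [heq, Nat.sub_self, List.range'_zero, List.filter_nil]
      rw [pvRuns, dif_neg (by omega)]
      simp
    · -- j < n : second chunk starts with j, kept by the filter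
      have hrange : List.range' j (array.length - j) =
          j :: List.range' (j + 1) (array.length - (j + 1)) := by
        rw [show array.length - j = (array.length - (j + 1)) + 1 by omega, List.range'_succ]
      have hPj : (!decide (array.getD j 0 - array.getD (j - 1) 0 ≥ 0)) = true := by
        simp only [Bool.not_eq_true', decide_eq_false_iff_not]
        have := maxProfitsInner_stop array (i + 1)
        rw [hj] at this
        exact this hjlt
      rw [hrange]
      simp only [List.filter_cons, hPj, if_true]
      have ihj2 := ih hjlt
      simp only [List.cons_append, List.zip_cons_cons, List.map_cons, List.tail_cons] at ihj2 ⊢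
      rw [ihj2]
  | case2 i h => omega

-- ===== VERDICT (by name: the statement is the Claim_ definition above) =====
theorem max_profits_spec : Claim_equal_max_profits := by
  intro array _hdom
  unfold Spec_max_profits max_profits max_profits_alt
  rw [maxProfitsLoop_eq_runs, List.nil_append]
  by_cases h0 : array.length = 0
  · rw [if_pos h0, pvRuns, dif_neg (by omega)]
  · rw [if_neg h0]
    have := pairs_eq_runs array 0 (by omega)
    simpa using this.symm
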